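-- pv_equiv track=rewrite | github.com/BakitD/Codility | 7/blocks.py | solution
-- ===== SOURCE A (Python) =====
-- def solution(H):
--     stack = []
--     blocks = 0
--
--     for height in H:
--         while len(stack) and stack[-1] > height:
--             stack.pop()
--         if len(stack) and stack[-1] == height:
--             pass
--         else:
--             blocks += 1
--             stack.append(height)
--     return blocks
-- ===== SOURCE B (Python) =====
-- def solution(H):
--     # For each position, scan backwards over earlier heights: skip ones that are
--     # strictly taller; a new block starts unless the first non-taller one equals h.
--     HL = list(H)
--     blocks = 0
--     for i, h in enumerate(HL):
--         j = i - 1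
--         while j >= 0 and HL[j] > h:
--             j -= 1
--         if j < 0 or HL[j] != h:
--             blocks += 1
--     return blocks
-- ===== Notes on version B (the rewrite author's own statement) =====
-- stated objective: alternative
-- what changed: Replaces the monotonic stack with a stackless per-position backward scan: a height starts a new block iff the nearest earlier height that is not strictly taller differs from it.
import Mathlib
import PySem

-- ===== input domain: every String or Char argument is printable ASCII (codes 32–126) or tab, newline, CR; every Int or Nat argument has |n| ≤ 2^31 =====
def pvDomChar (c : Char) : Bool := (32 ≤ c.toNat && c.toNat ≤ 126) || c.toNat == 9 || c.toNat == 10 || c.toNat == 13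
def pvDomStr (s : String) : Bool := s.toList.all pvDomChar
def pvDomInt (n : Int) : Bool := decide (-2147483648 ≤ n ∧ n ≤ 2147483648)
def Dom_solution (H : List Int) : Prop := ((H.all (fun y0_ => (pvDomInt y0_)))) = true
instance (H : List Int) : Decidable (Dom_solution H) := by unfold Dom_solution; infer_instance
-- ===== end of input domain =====

-- B replaces A's monotonic stack with a per-position backward scan (alternative decomposition, same results).


-- ===== PORT A =====
-- the inner 'while len(stack) and stack[-1] > height: stack.pop()' loop
-- (stack stored head = top, i.e. Python's end of list)
def popWhile (height : Int) : List Int → List Int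
  | [] => []
  | t :: rest => if t > height then popWhile height rest else t :: rest

def stepA (st : List Int × Int) (height : Int) : List Int × Int :=
  let s := popWhile height st.1
  match s with
  | t :: _ => if t = height then (s, st.2) else (height :: s, st.2 + 1)
  | [] => (height :: s, st.2 + 1)

def solution (H : List Int) : Int := (H.foldl stepA ([], 0)).2

-- ===== PORT B =====
-- the backward 'while j >= 0 and HL[j] > h: j -= 1' scan plus the 'j < 0 or HL[j] != h'
-- test, over the reversed prefix preceding the current position
def newBlock (h : Int) : List Int → Bool
  | [] => true
  | x :: xs => if x > h then newBlock h xs else decide (x ≠ h)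

def goB (rev : List Int) (blocks : Int) : List Int → Int
  | [] => blocks
  | h :: rest => goB (h :: rev) (if newBlock h rev then blocks + 1 else blocks) rest

def solution_alt (H : List Int) : Int := goB [] 0 H

-- ===== PRECONDITION & SPEC =====
def Spec_solution (H : List Int) (out : Int) : Prop := out = solution_alt H
instance (H : List Int) (out : Int) : Decidable (Spec_solution H out) := by unfold Spec_solution; infer_instance

-- ===== CLAIM (what is proved, stated in full; the proofs are below) =====
def Claim_equal_solution : Prop := ∀ (H : List Int), Dom_solution H → Spec_solution H (solution H)

-- ===== LEMMAS AND PROOFS =====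

-- invariant tying A's stack to B's reversed processed prefix
def StackInv (rev stack : List Int) : Prop :=
  List.IsChain (· > ·) stack ∧ ∀ v : Int, v ∈ stack ↔ newBlock v rev = false

lemma chain_mem_le {t : Int} {rest : List Int}
    (hc : List.IsChain (· > ·) (t :: rest)) : ∀ v ∈ t :: rest, v ≤ t := by
  induction rest generalizing t with
  | nil => intro v hv; rw [List.mem_singleton] at hv; omega
  | cons x xs ih =>
      intro v hv
      rcases List.isChain_cons_cons.mp hc with ⟨htx, hc'⟩
      rcases List.mem_cons.mp hv with rfl | hv
      · omega
      · have := ih hc' v hv; omega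

lemma popWhile_chain {h : Int} {s : List Int}
    (hc : List.IsChain (· > ·) s) : List.IsChain (· > ·) (popWhile h s) := by
  induction s with
  | nil => simp [popWhile]
  | cons t rest ih =>
      by_cases ht : t > h
      · simpa [popWhile, ht] using ih hc.of_cons
      · simpa [popWhile, ht] using hc

lemma mem_popWhile {h v : Int} {s : List Int}
    (hc : List.IsChain (· > ·) s) : v ∈ popWhile h s ↔ v ∈ s ∧ v ≤ h := by
  induction s with
  | nil => simp [popWhile]
  | cons t rest ih =>
      by_cases ht : t > h
      · rw [popWhile]; simp only [if_pos ht]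
        rw [ih hc.of_cons]
        constructor
        · rintro ⟨hv, hle⟩; exact ⟨List.mem_cons_of_mem _ hv, hle⟩
        · rintro ⟨hv, hle⟩
          rcases List.mem_cons.mp hv with rfl | hv
          · omega
          · exact ⟨hv, hle⟩
      · rw [popWhile]; simp only [if_neg ht]
        constructor
        · intro hv
          exact ⟨hv, le_trans (chain_mem_le hc v hv) (by omega)⟩
        · exact fun hv => hv.1

lemma step_inv {rev stack : List Int} {b h : Int} (hI : StackInv rev stack) :
    StackInv (h :: rev) (stepA (stack, b) h).1 ∧
      (stepA (stack, b) h).2 = (if newBlock h rev then b + 1 else b) := by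
  rcases hI with ⟨hc, hmem⟩
  have hc' := popWhile_chain (h := h) hc
  have hmem' : ∀ v : Int, v ∈ popWhile h stack ↔ v ∈ stack ∧ v ≤ h :=
    fun v => mem_popWhile hc
  generalize hq : popWhile h stack = q at hc' hmem'
  have hle : ∀ v ∈ q, v ≤ h := fun v hv => ((hmem' v).mp hv).2
  have hinq : h ∈ q ↔ newBlock h rev = false := by
    rw [hmem' h, hmem h]; simp
  have hmemNew : ∀ (s2 : List Int), (∀ v, v ∈ s2 ↔ (v ∈ q ∨ v = h)) →
      (∀ v : Int, v ∈ s2 ↔ newBlock v (h :: rev) = false) := by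
    intro s2 hs2 v
    rw [hs2 v]
    by_cases hvh : h > v
    · rw [newBlock]; simp only [if_pos hvh]
      rw [hmem' v, ← hmem v]
      constructor
      · rintro (⟨hv, _⟩ | rfl)
        · exact hv
        · omega
      · intro hv; exact Or.inl ⟨hv, by omega⟩
    · rw [newBlock]; simp only [if_neg hvh]
      constructor
      · rintro (hv | rfl)
        · have := hle v hv; simp; omega
        · simp
      · intro hv
        have : h = v := by simpa using hv
        exact Or.inr this.symm
  simp only [stepA, hq]
  cases q with
  | nil =>
      have hnb : newBlock h rev = true := by
        by_contra hfalse
        have : h ∈ ([] : List Int) :=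
          hinq.mpr (by revert hfalse; cases newBlock h rev <;> simp)
        simp at this
      refine ⟨⟨List.IsChain.singleton h, hmemNew [h] (by intro v; simp)⟩, by simp [hnb]⟩
  | cons t rest =>
      dsimp only
      by_cases hth : t = h
      · subst hth
        have hnb : newBlock t rev = false := hinq.mp (List.mem_cons_self ..)
        rw [if_pos rfl]
        refine ⟨⟨hc', hmemNew (t :: rest) (by intro v; simp; tauto)⟩, by simp [hnb]⟩
      · have hnot : h ∉ t :: rest := by
          intro hh
          have h1 : h ≤ t := chain_mem_le hc' h hh
          have h2 : t ≤ h := hle t (List.mem_cons_self ..)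
          omega
        have hnb : newBlock h rev = true := by
          by_contra hfalse
          exact hnot (hinq.mpr (by revert hfalse; cases newBlock h rev <;> simp))
        rw [if_neg hth]
        refine ⟨⟨?_, hmemNew (h :: t :: rest) (by intro v; simp; tauto)⟩, by simp [hnb]⟩
        refine List.isChain_cons_cons.mpr ⟨?_, hc'⟩
        have h2 : t ≤ h := hle t (List.mem_cons_self ..)
        omega

lemma main_lemma : ∀ (L rev stack : List Int) (b : Int), StackInv rev stack →
    (L.foldl stepA (stack, b)).2 = goB rev b L := by
  intro L
  induction L with
  | nil => intro rev stack b _; simp [goB]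
  | cons h rest ih =>
      intro rev stack b hI
      rcases step_inv (b := b) (h := h) hI with ⟨hI', hb⟩
      rw [List.foldl_cons, goB]
      have : stepA (stack, b) h = ((stepA (stack, b) h).1, if newBlock h rev then b + 1 else b) := by
        rw [← hb]
      rw [this]
      exact ih (h :: rev) _ _ hI'

-- ===== VERDICT (by name: the statement is the Claim_ definition above) =====
theorem solution_spec : Claim_equal_solution := by
  intro H _
  unfold Spec_solution solution solution_alt
  exact main_lemma H [] [] 0 ⟨List.IsChain.nil, by intro v; simp [newBlock]⟩
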